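-- pv_equiv track=rewrite | github.com/nyck33/coding_practice | Python/983_minCostTickets.py | find_earliest
-- ===== SOURCE A (Python) =====
-- def find_earliest(days, idx, threshold=7):
--     '''
--     Find earliest date that is within 7
--     or 30 days range of end_date from days[end_idx - km_days]
--     :param days: array of travel days
--     :param idx: i - weeks_thresh or i - months_thresh
--     :param threshold:
--     :return: idx of days with earliest date within threshold of days[idx]
--     '''
--     # todo: while loop back as far as possible
--     j = 1
--     prevs = []
--     end_date = days[idx]
--     while True:
--         #get date
--         prev_idx = idx - j
--         if prev_idx < 0:
--             break
--         prev = days[idx - j]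
--         if end_date - prev < threshold:
--             prevs.append(idx-j)
--         else:
--             break
--         j += 1
--     if len(prevs) == 0:
--         return None
--
--     return prevs[-1]
-- ===== SOURCE B (Python) =====
-- def find_earliest(days, idx, threshold=7):
--     end_date = days[idx]
--     cut = None  # last position in [0, idx) that is NOT within threshold
--     for k in range(idx):
--         if end_date - days[k] >= threshold:
--             cut = k
--     start = 0 if cut is None else cut + 1
--     return start if start <= idx - 1 else None
-- ===== Notes on version B (the rewrite author's own statement) =====
-- stated objective: simpler
-- what changed: B replaces A's backward while-loop that appends every qualifying index to a list and returns its last element by a single forward pass over days[0:idx] that remembers only the last index NOT within threshold and derives the answer arithmetically from it.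
import Mathlib
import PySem

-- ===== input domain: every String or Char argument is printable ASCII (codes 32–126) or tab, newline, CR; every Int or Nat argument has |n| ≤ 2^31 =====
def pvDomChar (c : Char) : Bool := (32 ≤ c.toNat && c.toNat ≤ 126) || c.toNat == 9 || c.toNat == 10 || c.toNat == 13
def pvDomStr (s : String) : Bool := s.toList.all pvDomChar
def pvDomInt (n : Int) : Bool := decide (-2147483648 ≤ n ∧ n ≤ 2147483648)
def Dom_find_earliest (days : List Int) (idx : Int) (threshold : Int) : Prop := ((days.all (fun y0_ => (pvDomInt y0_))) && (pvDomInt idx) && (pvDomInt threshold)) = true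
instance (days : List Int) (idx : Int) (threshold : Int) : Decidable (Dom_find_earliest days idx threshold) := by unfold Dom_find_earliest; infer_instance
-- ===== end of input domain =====

-- B replaces A's backward scan-and-collect with a one-pass forward scan keeping only the
-- last out-of-threshold position (objective: simpler, O(1) extra space; same return value).

-- ===== PORT A =====
-- the 'while True' loop: fuel = idx.toNat bounds the iterations (j runs 1..idx before idx-j < 0)
def findEarliestLoopA (days : List Int) (end_date threshold idx : Int) :
    Nat → Int → List Int → List Int
  | 0, _, prevs => prevs
  | f+1, j, prevs =>
    if idx - j < 0 then prevs
    else
      -- days[idx - j]: 0 ≤ idx - j < idx < len days under Pre_, so the total form is exact here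
      let prev := PySem.List.pyGetD days (idx - j) 0
      if end_date - prev < threshold then
        findEarliestLoopA days end_date threshold idx f (j + 1) (prevs ++ [idx - j])
      else prevs

def find_earliest (days : List Int) (idx : Int) (threshold : Int) : Option Int :=
  match PySem.List.pyGet? days idx with
  | none => none  -- IndexError: excluded by Pre_
  | some end_date =>
    let prevs := findEarliestLoopA days end_date threshold idx idx.toNat 1 []
    if prevs.length = 0 then none
    else PySem.List.pyGet? prevs (-1)   -- prevs[-1]; prevs ≠ [] here so this is some _

-- ===== PORT B =====
def find_earliest_alt (days : List Int) (idx : Int) (threshold : Int) : Option Int :=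
  match PySem.List.pyGet? days idx with
  | none => none  -- IndexError: excluded by Pre_
  | some end_date =>
    -- for k in range(idx): days[k] is in range (0 ≤ k < idx < len days under Pre_), total form exact
    let cut := (PySem.List.pyRange 0 idx 1).foldl
      (fun cut k => if end_date - PySem.List.pyGetD days k 0 ≥ threshold then some k else cut) none
    let start : Int := match cut with | none => 0 | some c => c + 1
    if start ≤ idx - 1 then some start else none

-- ===== PRECONDITION & SPEC =====
-- Pre_ excludes exactly the inputs where days[idx] raises IndexError in Python
def Pre_find_earliest (days : List Int) (idx : Int) (threshold : Int) : Prop :=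
  PySem.Raise.InRange days.length idx
instance (days : List Int) (idx : Int) (threshold : Int) : Decidable (Pre_find_earliest days idx threshold) := by unfold Pre_find_earliest; infer_instance

def pvWitness_find_earliest : List Int × Int × Int := ([1, 3, 4, 9], 2, 7)

def Spec_find_earliest (days : List Int) (idx : Int) (threshold : Int) (out : Option Int) : Prop := out = find_earliest_alt days idx threshold
instance (days : List Int) (idx : Int) (threshold : Int) (out : Option Int) : Decidable (Spec_find_earliest days idx threshold out) := by unfold Spec_find_earliest; infer_instance

-- ===== CLAIM (what is proved, stated in full; the proofs are below) =====
def Claim_equal_find_earliest : Prop := ∀ (days : List Int) (idx : Int) (threshold : Int), Dom_find_earliest days idx threshold → Pre_find_earliest days idx threshold → Spec_find_earliest days idx threshold (find_earliest days idx threshold)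

-- ===== LEMMAS AND PROOFS =====

-- abstract backward-collected run: segA f = [f-1, f-2, …, i] while each passes the threshold test
def segA (days : List Int) (e t : Int) : Nat → List Int
  | 0 => []
  | f+1 => if e - PySem.List.pyGetD days (f : Int) 0 < t then ((f : Int) :: segA days e t f) else []

-- A's final answer as a recursion on the top index
def resA (days : List Int) (e t : Int) : Nat → Option Int
  | 0 => none
  | m+1 => if e - PySem.List.pyGetD days (m : Int) 0 < t
           then some ((resA days e t m).getD (m : Int)) else none

-- B's accumulator: last failing position among 0..m-1
def cutB (days : List Int) (e t : Int) : Nat → Option Int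
  | 0 => none
  | m+1 => if e - PySem.List.pyGetD days (m : Int) 0 ≥ t then some (m : Int) else cutB days e t m

theorem loopA_eq_segA (days : List Int) (e t idx : Int) :
    ∀ (f : Nat) (acc : List Int),
      findEarliestLoopA days e t idx f (idx - f + 1) acc = acc ++ segA days e t f := by
  intro f
  induction f with
  | zero => intro acc; simp [findEarliestLoopA, segA]
  | succ f ih =>
    intro acc
    have hidx : idx - (idx - (f + 1 : Nat) + 1) = (f : Int) := by push_cast; ring
    simp only [findEarliestLoopA, hidx, segA]
    have : ¬ ((f : Int) < 0) := by omega
    rw [if_neg this]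
    by_cases hp : e - PySem.List.pyGetD days (f : Int) 0 < t
    · rw [if_pos hp, if_pos hp]
      have harg : idx - (f + 1 : Nat) + 1 + 1 = idx - (f : Int) + 1 := by push_cast; ring
      rw [harg, ih]
      simp
    · rw [if_neg hp, if_neg hp]
      simp

theorem segA_getLast (days : List Int) (e t : Int) :
    ∀ m : Nat, (segA days e t m).getLast? = resA days e t m := by
  intro m
  induction m with
  | zero => simp [segA, resA]
  | succ m ih =>
    simp only [segA, resA]
    by_cases hp : e - PySem.List.pyGetD days (m : Int) 0 < t
    · rw [if_pos hp, if_pos hp, List.getLast?_cons, ih]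
    · rw [if_neg hp, if_neg hp]
      rfl

theorem foldl_eq_cutB (days : List Int) (e t : Int) :
    ∀ m : Nat,
      (PySem.List.pyRange 0 (m : Int) 1).foldl
        (fun cut k => if e - PySem.List.pyGetD days k 0 ≥ t then some k else cut) none
      = cutB days e t m := by
  intro m
  induction m with
  | zero => simp [PySem.List.pyRange_one_eq_nil (le_refl (0:Int)), cutB]
  | succ m ih =>
    have h : ((m : Int) + 1) = ((m + 1 : Nat) : Int) := by push_cast; ring
    rw [cutB, ← ih, ← h, PySem.List.pyRange_one_succ_right (by positivity), List.foldl_append]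
    simp only [List.foldl_cons, List.foldl_nil]

theorem cutB_bounds (days : List Int) (e t : Int) :
    ∀ m : Nat, ∀ c : Int, cutB days e t m = some c → 0 ≤ c ∧ c < (m : Int) := by
  intro m
  induction m with
  | zero => intro c h; simp [cutB] at h
  | succ m ih =>
    intro c h
    simp only [cutB] at h
    by_cases hp : e - PySem.List.pyGetD days (m : Int) 0 ≥ t
    · rw [if_pos hp] at h
      cases h
      omega
    · rw [if_neg hp] at h
      have := ih c h
      omega

theorem resA_eq_cutB (days : List Int) (e t : Int) :
    ∀ m : Nat,
      resA days e t m =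
        (match cutB days e t m with
         | none => if m = 0 then none else some 0
         | some c => if c = (m : Int) - 1 then none else some (c + 1)) := by
  intro m
  induction m with
  | zero => simp [resA, cutB]
  | succ m ih =>
    simp only [resA, cutB]
    by_cases hp : e - PySem.List.pyGetD days (m : Int) 0 < t
    · rw [if_pos hp, if_neg (not_le.mpr hp), ih]
      cases hc : cutB days e t m with
      | none =>
        by_cases hm : m = 0
        · subst hm
          simp
        · rw [if_neg hm]
          simp
      | some c =>
        have hb := cutB_bounds days e t m c hc
        have hne : ¬ (c = ((m + 1 : Nat) : Int) - 1) := by push_cast; omega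
        show some ((if c = (m : Int) - 1 then none else some (c + 1)).getD (m : Int))
           = (if c = ((m + 1 : Nat) : Int) - 1 then none else some (c + 1))
        rw [if_neg hne]
        by_cases he : c = (m : Int) - 1
        · rw [if_pos he]
          simp only [Option.getD_none]
          congr 1
          omega
        · rw [if_neg he]
          simp only [Option.getD_some]
    · rw [if_neg hp, if_pos (not_lt.mp hp)]
      show (none : Option Int)
         = (if (m : Int) = ((m + 1 : Nat) : Int) - 1 then none else some ((m : Int) + 1))
      rw [if_pos (by push_cast; ring : ((m : Int) = ((m + 1 : Nat) : Int) - 1))]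

-- ===== VERDICT (by name: the statement is the Claim_ definition above) =====
theorem find_earliest_spec : Claim_equal_find_earliest := by
  intro days idx threshold _ _
  unfold Spec_find_earliest find_earliest find_earliest_alt
  cases hget : PySem.List.pyGet? days idx with
  | none => rfl
  | some e =>
    simp only
    by_cases hneg : idx < 0
    · -- idx ≤ -1: A's loop gets fuel 0; B's range is empty
      have ht : idx.toNat = 0 := Int.toNat_of_nonpos (le_of_lt hneg)
      rw [ht]
      simp [findEarliestLoopA, PySem.List.pyRange_one_eq_nil (le_of_lt hneg)]
      omega
    · rw [not_lt] at hneg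
      have hmi : ((idx.toNat : Int)) = idx := Int.toNat_of_nonneg hneg
      have hLoop : findEarliestLoopA days e threshold idx idx.toNat 1 [] =
          segA days e threshold idx.toNat := by
        have h := loopA_eq_segA days e threshold idx idx.toNat []
        have h1 : idx - (idx.toNat : Int) + 1 = 1 := by omega
        rw [h1] at h
        simpa using h
      have hFold : (PySem.List.pyRange 0 idx 1).foldl
          (fun cut k => if e - PySem.List.pyGetD days k 0 ≥ threshold then some k else cut) none
          = cutB days e threshold idx.toNat := by
        rw [← hmi]
        exact foldl_eq_cutB days e threshold idx.toNat
      rw [hLoop, hFold]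
      have hA : (if (segA days e threshold idx.toNat).length = 0 then none
                 else PySem.List.pyGet? (segA days e threshold idx.toNat) (-1))
                 = resA days e threshold idx.toNat := by
        by_cases hnil : segA days e threshold idx.toNat = []
        · simp [hnil, ← segA_getLast days e threshold idx.toNat]
        · rw [if_neg (by simpa [List.length_eq_zero_iff] using hnil)]
          rw [PySem.List.pyGet?_neg_one, segA_getLast]
      rw [hA, resA_eq_cutB days e threshold idx.toNat]
      simp only [hmi]
      cases hc : cutB days e threshold idx.toNat with
      | none =>
        show (if idx.toNat = 0 then none else some 0)
           = (if (0 : Int) ≤ idx - 1 then some (0 : Int) else none)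
        by_cases hm0 : idx.toNat = 0
        · rw [if_pos hm0, if_neg (by omega : ¬ ((0 : Int) ≤ idx - 1))]
        · rw [if_neg hm0, if_pos (by omega : ((0 : Int) ≤ idx - 1))]
      | some c =>
        have hb := cutB_bounds days e threshold idx.toNat c hc
        show (if c = idx - 1 then none else some (c + 1))
           = (if c + 1 ≤ idx - 1 then some (c + 1) else none)
        by_cases he : c = idx - 1
        · rw [if_pos (by omega : c = idx - 1), if_neg (by omega : ¬ (c + 1 ≤ idx - 1))]
        · rw [if_neg (by omega : ¬ c = idx - 1), if_pos (by omega : c + 1 ≤ idx - 1)]
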